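-- pv_equiv track=rewrite | github.com/12L-zl/programmers | 프로그래머스/2/42586. 기능개발/기능개발.py | solution
-- ===== SOURCE A (Python) =====
-- def solution(progresses, speeds):
--     answer = []
--     for i in range(len(progresses)) :
--         t = 100 - progresses[i]
--         if t % speeds[i] == 0 :
--             answer.append(t // speeds[i])
--         else :
--             answer.append((t // speeds[i]) + 1)   # [7, 3, 9]
--
--     for i in range(len(answer) - 1) :
--         if answer[i] > answer[i+1] :
--             answer[i+1] = answer[i]  # [7, 7, 9]
--
--     sets = set()
--     result = []
--     for i in answer :
--         if i not in sets : # element 순서 유지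
--             result.append(answer.count(i))
--             sets.add(i)
--     return result
-- ===== SOURCE B (Python) =====
-- def solution(progresses, speeds):
--     # one pass: days-to-finish via ceiling division, run lengths of the running maximum
--     counts = []
--     cur = None
--     for p, s in zip(progresses, speeds):
--         d = -((p - 100) // s)
--         if cur is None or d > cur:
--             counts.append(1)
--             cur = d
--         else:
--             counts[-1] += 1
--     return counts
-- ===== Notes on version B (the rewrite author's own statement) =====
-- stated objective: faster
-- what changed: replaces A's three passes (ceil-by-cases days list, index-loop prefix-max fixup, then dedup-with-set calling answer.count(i) for each new value) by a single zip pass counting run lengths of the running maximum of the ceiling days, removing the per-distinct-value inner count scan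
import Mathlib
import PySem

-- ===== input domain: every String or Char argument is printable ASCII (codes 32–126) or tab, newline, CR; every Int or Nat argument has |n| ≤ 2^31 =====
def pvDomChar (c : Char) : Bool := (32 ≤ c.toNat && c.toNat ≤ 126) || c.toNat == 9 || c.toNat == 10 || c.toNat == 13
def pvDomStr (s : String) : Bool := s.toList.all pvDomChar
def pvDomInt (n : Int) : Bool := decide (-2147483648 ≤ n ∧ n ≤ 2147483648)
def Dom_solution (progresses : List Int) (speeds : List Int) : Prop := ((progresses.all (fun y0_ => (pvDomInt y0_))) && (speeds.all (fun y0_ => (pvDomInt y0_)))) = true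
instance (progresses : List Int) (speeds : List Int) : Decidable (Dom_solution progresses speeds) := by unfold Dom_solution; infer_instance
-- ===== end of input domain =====

-- B replaces A's three passes by one zip pass counting run lengths of the running maximum of the ceiling days.

-- ===== PORT A =====
def solution (progresses : List Int) (speeds : List Int) : List Int :=
  let answer : List Int := (PySem.List.pyRange 0 (progresses.length : Int) 1).foldl
    (fun answer i =>
      let t := 100 - PySem.List.pyGetD progresses i 0
      if PySem.Int.mod t (PySem.List.pyGetD speeds i 0) = 0 then
        answer ++ [PySem.Int.floordiv t (PySem.List.pyGetD speeds i 0)]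
      else
        answer ++ [PySem.Int.floordiv t (PySem.List.pyGetD speeds i 0) + 1]) []
  let answer := (PySem.List.pyRange 0 ((answer.length : Int) - 1) 1).foldl
    (fun ans i =>
      if PySem.List.pyGetD ans i 0 > PySem.List.pyGetD ans (i + 1) 0 then
        PySem.List.pySetD ans (i + 1) (PySem.List.pyGetD ans i 0)
      else ans) answer
  let st := answer.foldl
    (fun (st : PySem.Set Int × List Int) i =>
      if PySem.Set.contains st.1 i then st
      else (PySem.Set.add st.1 i, st.2 ++ [(answer.count i : Int)])) (PySem.Set.empty, [])
  st.2

-- ===== PORT B =====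
def solution_alt (progresses : List Int) (speeds : List Int) : List Int :=
  let st := (progresses.zip speeds).foldl
    (fun (st : List Int × Option Int) ps =>
      let d := -(PySem.Int.floordiv (ps.1 - 100) ps.2)
      match st.2 with
      | none => (st.1 ++ [1], some d)
      | some cur =>
        if cur < d then (st.1 ++ [1], some d)
        else (PySem.List.pySetD st.1 (-1) (PySem.List.pyGetD st.1 (-1) 0 + 1), some cur))
    ([], none)
  st.1

-- ===== PRECONDITION & SPEC =====
-- Pre_ is exactly A's return domain: A raises IndexError when speeds is shorter than
-- progresses, and ZeroDivisionError on a zero speed at an index it reaches.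
def Pre_solution (progresses : List Int) (speeds : List Int) : Prop :=
  progresses.length ≤ speeds.length ∧ ∀ s ∈ speeds.take progresses.length, s ≠ 0
instance (progresses : List Int) (speeds : List Int) : Decidable (Pre_solution progresses speeds) := by
  unfold Pre_solution; infer_instance
def pvWitness_solution : List Int × List Int := ([93, 30, 55], [1, 30, 5])

def Spec_solution (progresses : List Int) (speeds : List Int) (out : List Int) : Prop := out = solution_alt progresses speeds
instance (progresses : List Int) (speeds : List Int) (out : List Int) : Decidable (Spec_solution progresses speeds out) := by unfold Spec_solution; infer_instance

-- ===== CLAIM (what is proved, stated in full; the proofs are below) =====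
def Claim_equal_solution : Prop := ∀ (progresses : List Int) (speeds : List Int), Dom_solution progresses speeds → Pre_solution progresses speeds → Spec_solution progresses speeds (solution progresses speeds)

-- ===== LEMMAS AND PROOFS =====

-- the ceiling-days list both programs compute
def pvDays (progresses speeds : List Int) : List Int :=
  (progresses.zip speeds).map (fun q => -(PySem.Int.floordiv (q.1 - 100) q.2))

-- running maximum (A's second pass as a recursion)
def pvPmAux (m : Int) : List Int → List Int
  | [] => []
  | y :: ys => max m y :: pvPmAux (max m y) ys

def pvPm : List Int → List Int
  | [] => []
  | x :: xs => x :: pvPmAux x xs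

-- run lengths of the running maximum (B's recursion)
def pvRuns (cur n : Int) : List Int → List Int
  | [] => [n]
  | d :: ds => if cur < d then n :: pvRuns d 1 ds else pvRuns cur (n + 1) ds

def pvCurAfter (cur : Int) : List Int → Int
  | [] => cur
  | d :: ds => if cur < d then pvCurAfter d ds else pvCurAfter cur ds

-- run-length encoding of a list (A's third pass on a sorted list)
def pvRleGo (cur n : Int) : List Int → List Int
  | [] => [n]
  | y :: ys => if y = cur then pvRleGo cur (n + 1) ys else n :: pvRleGo y 1 ys

def pvRle : List Int → List Int
  | [] => []
  | x :: xs => pvRleGo x 1 xs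

-- ordered first occurrences not yet in s (A's third pass, value part)
def pvDdp (s : PySem.Set Int) : List Int → List Int
  | [] => []
  | x :: xs => if PySem.Set.contains s x then pvDdp s xs else x :: pvDdp (PySem.Set.add s x) xs

-- A's loop bodies as named functions
def pvStep2 (ans : List Int) (i : Int) : List Int :=
  if PySem.List.pyGetD ans i 0 > PySem.List.pyGetD ans (i + 1) 0 then
    PySem.List.pySetD ans (i + 1) (PySem.List.pyGetD ans i 0)
  else ans

def pvStep3 (m : List Int) (st : PySem.Set Int × List Int) (i : Int) : PySem.Set Int × List Int :=
  if PySem.Set.contains st.1 i then st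
  else (PySem.Set.add st.1 i, st.2 ++ [(m.count i : Int)])

def pvStepB (st : List Int × Option Int) (d : Int) : List Int × Option Int :=
  match st.2 with
  | none => (st.1 ++ [1], some d)
  | some cur =>
    if cur < d then (st.1 ++ [1], some d)
    else (PySem.List.pySetD st.1 (-1) (PySem.List.pyGetD st.1 (-1) 0 + 1), some cur)

-- ceiling division: -((-t) // s) = t // s, +1 unless s divides t
theorem pvCeilPos (t s : Int) (hs : 0 < s) :
    -(PySem.Int.floordiv (-t) s) =
      if PySem.Int.mod t s = 0 then PySem.Int.floordiv t s else PySem.Int.floordiv t s + 1 := by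
  have hbr := (PySem.Int.floordiv_eq_iff_of_pos (a := t) (b := s) (q := PySem.Int.floordiv t s) hs).mp rfl
  have hmm := PySem.Int.floordiv_mul_add_mod t s
  have hm0 : 0 ≤ PySem.Int.mod t s := PySem.Int.mod_nonneg t hs
  rw [PySem.Int.neg_floordiv_neg_eq_iff_of_pos hs]
  split_ifs with h
  · constructor <;> nlinarith
  · have hmpos : 0 < PySem.Int.mod t s := lt_of_le_of_ne hm0 (Ne.symm h)
    have hmlt : PySem.Int.mod t s < s := PySem.Int.mod_lt t hs
    constructor <;> nlinarith

theorem pvCeil (t s : Int) (hs : s ≠ 0) :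
    -(PySem.Int.floordiv (-t) s) =
      if PySem.Int.mod t s = 0 then PySem.Int.floordiv t s else PySem.Int.floordiv t s + 1 := by
  rcases lt_or_gt_of_ne hs with hneg | hpos
  · have key := pvCeilPos (-t) (-s) (by omega)
    rw [PySem.Int.floordiv_neg_neg (-t) s, PySem.Int.floordiv_neg_neg t s] at key
    have e3 : (PySem.Int.mod (-t) (-s) = 0) ↔ (PySem.Int.mod t s = 0) := by
      rw [PySem.Int.mod_eq_zero_iff_dvd, PySem.Int.mod_eq_zero_iff_dvd]
      constructor
      · intro hh; simpa using (neg_dvd.mp (dvd_neg.mp hh))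
      · intro hh; exact dvd_neg.mpr (neg_dvd.mpr hh)
    simp only [e3] at key
    exact key
  · exact pvCeilPos t s hpos

-- first pass: an append-singleton fold is a map
theorem pvFoldMap (l : List Int) (c : Int → Prop) [DecidablePred c] (u v : Int → Int)
    (init : List Int) :
    l.foldl (fun acc i => if c i then acc ++ [u i] else acc ++ [v i]) init
      = init ++ l.map (fun i => if c i then u i else v i) := by
  induction l generalizing init with
  | nil => simp
  | cons x xs ih => by_cases h : c x <;> simp [h, ih]

-- the first pass produces the ceiling-days list
theorem pvAnswerEq (progresses speeds : List Int)
    (hlen : progresses.length ≤ speeds.length)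
    (hnz : ∀ s ∈ speeds.take progresses.length, s ≠ 0) :
    (PySem.List.pyRange 0 (progresses.length : Int) 1).map
      (fun i =>
        if PySem.Int.mod (100 - PySem.List.pyGetD progresses i 0) (PySem.List.pyGetD speeds i 0) = 0 then
          PySem.Int.floordiv (100 - PySem.List.pyGetD progresses i 0) (PySem.List.pyGetD speeds i 0)
        else
          PySem.Int.floordiv (100 - PySem.List.pyGetD progresses i 0) (PySem.List.pyGetD speeds i 0) + 1)
      = pvDays progresses speeds := by
  apply List.ext_getElem
  · simp [pvDays, PySem.List.length_pyRange_one]; omega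
  · intro i h1 h2
    have hi : i < progresses.length := by
      simpa [PySem.List.length_pyRange_one] using h1
    have his : i < speeds.length := by omega
    rw [List.getElem_map, PySem.List.getElem_pyRange_one _ _ _ (by
      simpa [PySem.List.length_pyRange_one] using h1)]
    have hgp : PySem.List.pyGetD progresses (0 + (i : Int)) 0 = progresses[i] := by
      rw [PySem.List.pyGetD_eq_getElem _ _ (by omega) (by omega)]
      simp
    have hgs : PySem.List.pyGetD speeds (0 + (i : Int)) 0 = speeds[i] := by
      rw [PySem.List.pyGetD_eq_getElem _ _ (by omega) (by omega)]
      simp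
    simp only [hgp, hgs]
    have hmem : speeds[i] ∈ speeds.take progresses.length := by
      have hg : (speeds.take progresses.length)[i]'(by simp; omega) = speeds[i] :=
        List.getElem_take
      rw [← hg]
      exact List.getElem_mem _
    have hs : speeds[i] ≠ 0 := hnz _ hmem
    have hdays : (pvDays progresses speeds)[i]'h2
        = -(PySem.Int.floordiv (progresses[i] - 100) speeds[i]) := by
      simp [pvDays, List.getElem_zip]
    rw [hdays]
    have hneg : progresses[i] - 100 = -(100 - progresses[i]) := by ring
    rw [hneg]
    exact (pvCeil (100 - progresses[i]) speeds[i] hs).symm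

-- index-shift for the second pass
theorem pvGetD_cons_succ (x : Int) (l : List Int) (a : Int) (ha : 0 ≤ a) :
    PySem.List.pyGetD (x :: l) (a + 1) 0 = PySem.List.pyGetD l a 0 := by
  simp only [PySem.List.pyGetD, PySem.List.pyGet?, PySem.List.pyIdx?]
  rw [if_pos (by omega : (0:Int) ≤ a + 1), if_pos ha]
  by_cases h : a < (l.length : Int)
  · rw [if_pos (by simp; omega), if_pos h]
    have ht : (a + 1).toNat = a.toNat + 1 := by omega
    simp [ht]
  · rw [if_neg (by simp; omega), if_neg h]
    rfl

theorem pvSetD_cons_succ (x : Int) (l : List Int) (a : Int) (ha : 0 ≤ a) (v : Int) :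
    PySem.List.pySetD (x :: l) (a + 1) v = x :: PySem.List.pySetD l a v := by
  rw [PySem.List.pySetD_of_nonneg _ _ (by omega), PySem.List.pySetD_of_nonneg _ _ ha]
  have ht : (a + 1).toNat = a.toNat + 1 := by omega
  simp [ht]

theorem pvStep2_cons (x : Int) (l : List Int) (a : Int) (ha : 0 ≤ a) :
    pvStep2 (x :: l) (a + 1) = x :: pvStep2 l a := by
  unfold pvStep2
  rw [pvGetD_cons_succ x l a ha, show a + 1 + 1 = (a + 1) + 1 from rfl,
      pvGetD_cons_succ x l (a + 1) (by omega), pvSetD_cons_succ x l (a + 1) (by omega)]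
  split <;> rfl

theorem pvShift (k : Nat) : ∀ (a : Int), 0 ≤ a → ∀ (x : Int) (l : List Int),
    (PySem.List.pyRange (a + 1) (a + 1 + (k : Int)) 1).foldl pvStep2 (x :: l)
      = x :: (PySem.List.pyRange a (a + (k : Int)) 1).foldl pvStep2 l := by
  induction k with
  | zero => intro a ha x l; simp [PySem.List.pyRange_one_eq_nil]
  | succ k ih =>
    intro a ha x l
    push_cast
    rw [PySem.List.pyRange_one_cons (show a + 1 < a + 1 + ((k : Int) + 1) by omega),
        PySem.List.pyRange_one_cons (show a < a + ((k : Int) + 1) by omega)]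
    simp only [List.foldl_cons]
    rw [pvStep2_cons x l a ha]
    have h1 : a + 1 + ((k : Int) + 1) = (a + 1) + 1 + (k : Int) := by ring
    have h2 : a + ((k : Int) + 1) = (a + 1) + (k : Int) := by ring
    rw [h1, h2]
    exact ih (a + 1) (by omega) x (pvStep2 l a)

-- the second pass computes the running maximum
theorem pvSecond : ∀ (n : Nat) (l : List Int), l.length ≤ n →
    (PySem.List.pyRange 0 ((l.length : Int) - 1) 1).foldl pvStep2 l = pvPm l := by
  intro n
  induction n with
  | zero =>
    intro l hl
    have : l = [] := List.length_eq_zero_iff.mp (by omega)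
    subst this
    simp [PySem.List.pyRange_one_eq_nil, pvPm]
  | succ n ih =>
    intro l hl
    match l with
    | [] => rw [PySem.List.pyRange_one_eq_nil (by norm_num)]; rfl
    | [x] =>
      rw [PySem.List.pyRange_one_eq_nil (by simp)]
      rfl
    | x :: y :: r =>
      have hlen2 : ((x :: y :: r).length : Int) - 1 = (r.length : Int) + 1 := by
        simp
      rw [hlen2, PySem.List.pyRange_one_cons (by omega : (0:Int) < (r.length : Int) + 1)]
      simp only [List.foldl_cons]
      have hstep : pvStep2 (x :: y :: r) 0 = x :: max x y :: r := by
        unfold pvStep2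
        rw [PySem.List.pyGetD_zero_cons,
            show ((0 : Int) + 1) = (0 : Int) + 1 from rfl,
            pvGetD_cons_succ x (y :: r) 0 le_rfl,
            PySem.List.pyGetD_zero_cons]
        split_ifs with hxy
        · rw [pvSetD_cons_succ x (y :: r) 0 le_rfl,
              PySem.List.pySetD_of_nonneg _ _ le_rfl]
          simp [max_eq_left (le_of_lt hxy)]
        · have : max x y = y := max_eq_right (by omega)
          simp [this]
      rw [hstep]
      have hsh := pvShift r.length 0 le_rfl x (max x y :: r)
      simp only [zero_add] at hsh
      rw [show (1 : Int) + (r.length : Int) = (r.length : Int) + 1 from by ring] at hsh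
      simp only [zero_add]
      rw [hsh]
      have hlen3 : (r.length : Int) = ((max x y :: r).length : Int) - 1 := by
        simp
      rw [hlen3, ih (max x y :: r) (by simp at hl ⊢; omega)]
      simp [pvPm, pvPmAux]

-- third pass: the fold collects counts of first occurrences
theorem pvThird (m : List Int) : ∀ (l : List Int) (s : PySem.Set Int) (res : List Int),
    (l.foldl (pvStep3 m) (s, res)).2 = res ++ (pvDdp s l).map (fun v => (m.count v : Int)) := by
  intro l
  induction l with
  | nil => intro s res; simp [pvDdp]
  | cons x xs ih =>
    intro s res
    by_cases h : PySem.Set.contains s x = true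
    · have h' : x ∈ s := by simpa [PySem.Set.contains] using h
      simp [pvStep3, pvDdp, h', ih]
    · have h' : x ∉ s := by simpa [PySem.Set.contains] using h
      simp [pvStep3, pvDdp, h', ih]

theorem pvContains_add (s : PySem.Set Int) (x y : Int) :
    PySem.Set.contains (PySem.Set.add s x) y = (PySem.Set.contains s y || y == x) := by
  unfold PySem.Set.add
  by_cases h : PySem.Set.contains s x = true
  · rw [if_pos h]
    by_cases hyx : y = x
    · subst hyx; simp only [BEq.rfl, Bool.or_true]; exact h
    · simp [hyx]
  · rw [if_neg h]
    simp only [PySem.Set.contains] at *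
    rw [List.contains_append]
    by_cases hyx : y = x <;> simp [hyx]

theorem pvDdp_congr : ∀ (l : List Int) (s s' : PySem.Set Int),
    (∀ y ∈ l, PySem.Set.contains s y = PySem.Set.contains s' y) → pvDdp s l = pvDdp s' l := by
  intro l
  induction l with
  | nil => intro s s' _; rfl
  | cons x xs ih =>
    intro s s' h
    have hx := h x (by simp)
    unfold pvDdp
    rw [hx]
    split
    · exact ih s s' (fun y hy => h y (by simp [hy]))
    · rw [ih (PySem.Set.add s x) (PySem.Set.add s' x)
          (fun y hy => by rw [pvContains_add, pvContains_add, h y (by simp [hy])])]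

theorem pvDdp_skipAll : ∀ (t l : List Int) (s : PySem.Set Int),
    (∀ y ∈ t, PySem.Set.contains s y = true) → pvDdp s (t ++ l) = pvDdp s l := by
  intro t
  induction t with
  | nil => intro l s _; rfl
  | cons y ys ih =>
    intro l s h
    simp only [List.cons_append, pvDdp, h y (by simp), if_pos]
    exact ih l s (fun z hz => h z (by simp [hz]))

theorem pvDdp_subset : ∀ (l : List Int) (s : PySem.Set Int) (v : Int), v ∈ pvDdp s l → v ∈ l := by
  intro l
  induction l with
  | nil => intro s v h; simp [pvDdp] at h
  | cons x xs ih =>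
    intro s v h
    unfold pvDdp at h
    split at h
    · exact List.mem_cons_of_mem _ (ih _ _ h)
    · rcases List.mem_cons.mp h with h | h
      · exact List.mem_cons.mpr (Or.inl h)
      · exact List.mem_cons_of_mem _ (ih _ _ h)

-- run-length encoding, head form
theorem pvRleGoEq : ∀ (xs : List Int) (cur n : Int),
    pvRleGo cur n xs
      = (n + ((xs.takeWhile (· == cur)).length : Int)) :: pvRle (xs.dropWhile (· == cur)) := by
  intro xs
  induction xs with
  | nil => intro cur n; simp [pvRleGo, pvRle]
  | cons y ys ih =>
    intro cur n
    by_cases h : y = cur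
    · have hb : (y == cur) = true := by simp [h]
      rw [List.takeWhile_cons_of_pos (p := fun z => z == cur) (a := y) hb,
          List.dropWhile_cons_of_pos (p := fun z => z == cur) (a := y) hb]
      simp only [pvRleGo, if_pos h]
      rw [ih cur (n + 1)]
      congr 1
      simp only [List.length_cons]
      push_cast
      ring
    · have hb : ¬ ((y == cur) = true) := by simp [h]
      rw [List.takeWhile_cons_of_neg (p := fun z => z == cur) (a := y) hb,
          List.dropWhile_cons_of_neg (p := fun z => z == cur) (a := y) hb]
      simp only [pvRleGo, if_neg h, pvRle, List.length_nil]
      congr 1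
      push_cast
      ring

-- sorted: x does not survive dropping its leading run
theorem pvNotMemDrop : ∀ (xs : List Int) (x : Int), (∀ y ∈ xs, x ≤ y) → xs.Pairwise (· ≤ ·) →
    x ∉ xs.dropWhile (· == x) := by
  intro xs
  induction xs with
  | nil => intro x _ _ h; simp at h
  | cons y ys ih =>
    intro x hle hp hmem
    by_cases h : (y == x) = true
    · rw [List.dropWhile_cons_of_pos (p := fun z => z == x) (a := y) h] at hmem
      exact ih x (fun z hz => hle z (by simp [hz]))
        ((List.pairwise_cons.mp hp).2) hmem
    · rw [List.dropWhile_cons_of_neg (p := fun z => z == x) (a := y) h] at hmem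
      have hyx : y ≠ x := by simpa using h
      rcases List.mem_cons.mp hmem with hh | hh
      · exact hyx hh.symm
      · have h1 : y ≤ x := (List.pairwise_cons.mp hp).1 x hh
        have h2 : x ≤ y := hle y (by simp)
        exact hyx (le_antisymm h1 h2)

theorem pvCountRun (x : Int) (xs : List Int) (hp : (x :: xs).Pairwise (· ≤ ·)) :
    xs.count x = (xs.takeWhile (· == x)).length := by
  have hle := (List.pairwise_cons.mp hp).1
  have hpxs := (List.pairwise_cons.mp hp).2
  have hsplit : xs.takeWhile (· == x) ++ xs.dropWhile (· == x) = xs :=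
    List.takeWhile_append_dropWhile
  have h1 : (xs.takeWhile (· == x)).count x = (xs.takeWhile (· == x)).length := by
    rw [List.count_eq_length]
    intro b hb
    have := List.mem_takeWhile_imp hb
    simp at this
    omega
  have h2 : (xs.dropWhile (· == x)).count x = 0 := by
    rw [List.count_eq_zero]
    exact pvNotMemDrop xs x hle hpxs
  calc xs.count x = (xs.takeWhile (· == x) ++ xs.dropWhile (· == x)).count x := by rw [hsplit]
    _ = (xs.takeWhile (· == x)).length := by rw [List.count_append, h1, h2]; omega

-- A's third pass on a sorted list is its run-length encoding
theorem pvSortedRle : ∀ (n : Nat) (m : List Int), m.length ≤ n → m.Pairwise (· ≤ ·) →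
    (pvDdp PySem.Set.empty m).map (fun v => (m.count v : Int)) = pvRle m := by
  intro n
  induction n with
  | zero =>
    intro m hm _
    have : m = [] := List.length_eq_zero_iff.mp (by omega)
    subst this; rfl
  | succ n ih =>
    intro m hm hp
    match m, hp with
    | [], _ => rfl
    | x :: xs, hp =>
      have hle : ∀ y ∈ xs, x ≤ y := (List.pairwise_cons.mp hp).1
      have hpxs : xs.Pairwise (· ≤ ·) := (List.pairwise_cons.mp hp).2
      have hxdw : x ∉ xs.dropWhile (· == x) := pvNotMemDrop xs x hle hpxs
      have hc : PySem.Set.contains PySem.Set.empty x = false := rfl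
      have hstep1 : pvDdp PySem.Set.empty (x :: xs)
          = x :: pvDdp (PySem.Set.add PySem.Set.empty x) xs := by
        simp [pvDdp, PySem.Set.contains, PySem.Set.empty]
      have haddx : PySem.Set.add PySem.Set.empty x = [x] := by
        simp [PySem.Set.add]
      have hsplit : xs.takeWhile (· == x) ++ xs.dropWhile (· == x) = xs :=
        List.takeWhile_append_dropWhile
      have hskip : pvDdp [x] xs = pvDdp [x] (xs.dropWhile (· == x)) := by
        conv_lhs => rw [← hsplit]
        apply pvDdp_skipAll
        intro y hy
        have hyx : y = x := by simpa using List.mem_takeWhile_imp hy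
        subst hyx
        simp [PySem.Set.contains]
      have hcongr : pvDdp [x] (xs.dropWhile (· == x))
          = pvDdp PySem.Set.empty (xs.dropWhile (· == x)) := by
        apply pvDdp_congr
        intro y hy
        have hyx : y ≠ x := fun he => hxdw (he ▸ hy)
        simp [PySem.Set.contains, PySem.Set.empty, hyx]
      have hmapc : ∀ v ∈ pvDdp PySem.Set.empty (xs.dropWhile (· == x)),
          ((x :: xs).count v : Int) = ((xs.dropWhile (· == x)).count v : Int) := by
        intro v hv
        have hvdw := pvDdp_subset _ _ _ hv
        have hvx : v ≠ x := fun he => hxdw (he ▸ hvdw)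
        have htw : v ∉ xs.takeWhile (· == x) := by
          intro hvt
          exact hvx (by simpa using List.mem_takeWhile_imp hvt)
        have h0 : (xs.takeWhile (· == x)).count v = 0 := List.count_eq_zero.mpr htw
        have hxsv : xs.count v = (xs.dropWhile (· == x)).count v := by
          conv_lhs => rw [← hsplit]
          rw [List.count_append, h0]
          omega
        have : (x :: xs).count v = (xs.dropWhile (· == x)).count v := by
          have hxv : ¬ x = v := fun he => hvx he.symm
          rw [List.count_cons]
          simp [hxsv, hxv]
        exact_mod_cast this
      have hlen' : (xs.dropWhile (· == x)).length ≤ n := by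
        have := (List.dropWhile_sublist (l := xs) (· == x)).length_le
        simp at hm
        omega
      have hpdw : (xs.dropWhile (· == x)).Pairwise (· ≤ ·) :=
        hpxs.sublist (List.dropWhile_sublist _)
      rw [hstep1, haddx, hskip, hcongr, List.map_cons, List.map_congr_left hmapc,
          ih (xs.dropWhile (· == x)) hlen' hpdw]
      show _ = pvRleGo x 1 xs
      rw [pvRleGoEq xs x 1]
      congr 1
      have hcx : (x :: xs).count x = (xs.takeWhile (· == x)).length + 1 := by
        rw [List.count_cons]
        simp [pvCountRun x xs hp]
      rw [hcx]
      push_cast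
      ring

-- run-length of the running maximum = B's runs
theorem pvRleGoPm : ∀ (xs : List Int) (cur n : Int),
    pvRleGo cur n (pvPmAux cur xs) = pvRuns cur n xs := by
  intro xs
  induction xs with
  | nil => intro cur n; rfl
  | cons y ys ih =>
    intro cur n
    by_cases h : cur < y
    · have hmax : max cur y = y := max_eq_right (le_of_lt h)
      simp only [pvPmAux, pvRleGo, hmax, pvRuns, if_pos h, if_neg (by omega : ¬ y = cur)]
      rw [ih]
    · have hmax : max cur y = cur := max_eq_left (by omega)
      simp only [pvPmAux, pvRleGo, hmax, pvRuns, if_neg h]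
      simp [ih]

-- the running maximum is sorted
theorem pvPmAux_le : ∀ (xs : List Int) (m z : Int), z ∈ pvPmAux m xs → m ≤ z := by
  intro xs
  induction xs with
  | nil => intro m z h; simp [pvPmAux] at h
  | cons y ys ih =>
    intro m z h
    rcases List.mem_cons.mp h with h | h
    · rw [h]; exact le_max_left _ _
    · exact le_trans (le_max_left m y) (ih (max m y) z h)

theorem pvPmAux_pairwise : ∀ (xs : List Int) (m : Int), (pvPmAux m xs).Pairwise (· ≤ ·) := by
  intro xs
  induction xs with
  | nil => intro m; simp [pvPmAux]
  | cons y ys ih =>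
    intro m
    rw [pvPmAux, List.pairwise_cons]
    exact ⟨fun z hz => pvPmAux_le ys (max m y) z hz, ih (max m y)⟩

theorem pvPm_pairwise (l : List Int) : (pvPm l).Pairwise (· ≤ ·) := by
  match l with
  | [] => simp [pvPm]
  | x :: xs =>
    rw [pvPm, List.pairwise_cons]
    exact ⟨fun z hz => pvPmAux_le xs x z hz, pvPmAux_pairwise xs x⟩

theorem pvSetD_neg_one_append (xs : List Int) (k v : Int) :
    PySem.List.pySetD (xs ++ [k]) (-1) v = xs ++ [v] := by
  simp [PySem.List.pySetD, PySem.List.pySet?, PySem.List.pyIdx?]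

-- B's fold
theorem pvFoldB : ∀ (ds c : List Int) (k cur : Int),
    ds.foldl pvStepB (c ++ [k], some cur) = (c ++ pvRuns cur k ds, some (pvCurAfter cur ds)) := by
  intro ds
  induction ds with
  | nil => intro c k cur; simp [pvRuns, pvCurAfter]
  | cons d ds ih =>
    intro c k cur
    by_cases h : cur < d
    · simp only [List.foldl_cons, pvStepB, if_pos h]
      rw [ih (c ++ [k]) 1 d]
      simp [pvRuns, pvCurAfter, h]
    · simp only [List.foldl_cons, pvStepB, if_neg h]
      rw [PySem.List.pyGetD_neg_one_append_singleton, pvSetD_neg_one_append,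
          ih c (k + 1) cur]
      simp [pvRuns, pvCurAfter, h]

-- A's pipeline as named stages (each stage is definitionally A's corresponding loop)
def pvFirstPass (progresses speeds : List Int) : List Int :=
  (PySem.List.pyRange 0 (progresses.length : Int) 1).foldl
    (fun answer i =>
      let t := 100 - PySem.List.pyGetD progresses i 0
      if PySem.Int.mod t (PySem.List.pyGetD speeds i 0) = 0 then
        answer ++ [PySem.Int.floordiv t (PySem.List.pyGetD speeds i 0)]
      else
        answer ++ [PySem.Int.floordiv t (PySem.List.pyGetD speeds i 0) + 1]) []

def pvSecondPass (l : List Int) : List Int :=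
  (PySem.List.pyRange 0 ((l.length : Int) - 1) 1).foldl pvStep2 l

def pvThirdPass (m : List Int) : List Int :=
  (m.foldl (pvStep3 m) (PySem.Set.empty, [])).2

theorem pvSolutionDecomp (ps ss : List Int) :
    solution ps ss = pvThirdPass (pvSecondPass (pvFirstPass ps ss)) := rfl

theorem pvFirstPassEq (ps ss : List Int) :
    pvFirstPass ps ss = (PySem.List.pyRange 0 (ps.length : Int) 1).map
      (fun i =>
        if PySem.Int.mod (100 - PySem.List.pyGetD ps i 0) (PySem.List.pyGetD ss i 0) = 0 then
          PySem.Int.floordiv (100 - PySem.List.pyGetD ps i 0) (PySem.List.pyGetD ss i 0)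
        else
          PySem.Int.floordiv (100 - PySem.List.pyGetD ps i 0) (PySem.List.pyGetD ss i 0) + 1) := by
  have h := pvFoldMap (PySem.List.pyRange 0 (ps.length : Int) 1)
    (fun i => PySem.Int.mod (100 - PySem.List.pyGetD ps i 0) (PySem.List.pyGetD ss i 0) = 0)
    (fun i => PySem.Int.floordiv (100 - PySem.List.pyGetD ps i 0) (PySem.List.pyGetD ss i 0))
    (fun i => PySem.Int.floordiv (100 - PySem.List.pyGetD ps i 0) (PySem.List.pyGetD ss i 0) + 1)
    []
  simpa using h

theorem pvRlePm (l : List Int) :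
    pvRle (pvPm l) = (match l with | [] => [] | d :: ds => pvRuns d 1 ds) := by
  match l with
  | [] => rfl
  | d :: ds => exact pvRleGoPm ds d 1

theorem pvAltEq (ps ss : List Int) :
    solution_alt ps ss = (match pvDays ps ss with | [] => [] | d :: ds => pvRuns d 1 ds) := by
  have h0 : solution_alt ps ss
      = ((ps.zip ss).foldl
          (fun st q => pvStepB st (-(PySem.Int.floordiv (q.1 - 100) q.2))) ([], none)).1 := rfl
  rw [h0, ← List.foldl_map (f := fun q : Int × Int => -(PySem.Int.floordiv (q.1 - 100) q.2))
      (g := pvStepB)]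
  have hdays : (ps.zip ss).map (fun q : Int × Int => -(PySem.Int.floordiv (q.1 - 100) q.2))
      = pvDays ps ss := rfl
  rw [hdays]
  cases h : pvDays ps ss with
  | nil => rfl
  | cons d ds =>
    rw [List.foldl_cons]
    have h1 : pvStepB ([], none) d = (([] : List Int) ++ [1], some d) := rfl
    rw [h1, pvFoldB ds [] 1 d]
    simp

-- ===== VERDICT (by name: the statement is the Claim_ definition above) =====
theorem solution_spec : Claim_equal_solution := by
  intro ps ss _ hPre
  obtain ⟨hlen, hnz⟩ := hPre
  unfold Spec_solution
  rw [pvSolutionDecomp, pvFirstPassEq, pvAnswerEq ps ss hlen hnz, pvAltEq]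
  have h2 : pvSecondPass (pvDays ps ss) = pvPm (pvDays ps ss) := by
    unfold pvSecondPass
    exact pvSecond (pvDays ps ss).length _ le_rfl
  rw [h2]
  have h3 : pvThirdPass (pvPm (pvDays ps ss)) = pvRle (pvPm (pvDays ps ss)) := by
    unfold pvThirdPass
    rw [pvThird (pvPm (pvDays ps ss)) (pvPm (pvDays ps ss)) PySem.Set.empty [],
        pvSortedRle (pvPm (pvDays ps ss)).length _ le_rfl (pvPm_pairwise _)]
    simp
  rw [h3, pvRlePm]
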